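-- pv_equiv track=rewrite | github.com/julliatran/rubikspaint | main.py | reduceTriples
-- ===== SOURCE A (Python) =====
-- def reduceTriples(solution):
--     result = []
--
--     # reduce triple rotation
--     i = 0
--     while i < len(solution):
--         if i < len(solution)-2:
--             face1, dir1 = solution[i]
--             face2, dir2 = solution[i+1]
--             face3, dir3 = solution[i+2]
--             if face1 == face2 and dir1 == dir2 and face2 == face3 \
--               and dir2 == dir3:
--                 result.append((face1, -dir1))
--                 i += 3
--             else:
--                 result.append(solution[i])
--                 i += 1
--         else:
--             result.append(solution[i])
--             i += 1
--     return result
-- ===== SOURCE B (Python) =====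
-- def reduceTriples(solution):
--     result = []
--     n = len(solution)
--     i = 0
--     while i < n:
--         face, dir = solution[i]
--         j = i
--         while j < n and solution[j] == (face, dir):
--             j += 1
--         L = j - i
--         result += [(face, -dir)] * (L // 3)
--         result += [(face, dir)] * (L % 3)
--         i = j
--     return result
-- ===== Notes on version B (the rewrite author's own statement) =====
-- stated objective: alternative
-- what changed: Replaces the window scan that steps an index by 1 or 3 while comparing three consecutive moves with a run-length decomposition: each maximal run of L equal moves contributes L//3 reversed moves followed by L%3 originals.
import Mathlib
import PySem

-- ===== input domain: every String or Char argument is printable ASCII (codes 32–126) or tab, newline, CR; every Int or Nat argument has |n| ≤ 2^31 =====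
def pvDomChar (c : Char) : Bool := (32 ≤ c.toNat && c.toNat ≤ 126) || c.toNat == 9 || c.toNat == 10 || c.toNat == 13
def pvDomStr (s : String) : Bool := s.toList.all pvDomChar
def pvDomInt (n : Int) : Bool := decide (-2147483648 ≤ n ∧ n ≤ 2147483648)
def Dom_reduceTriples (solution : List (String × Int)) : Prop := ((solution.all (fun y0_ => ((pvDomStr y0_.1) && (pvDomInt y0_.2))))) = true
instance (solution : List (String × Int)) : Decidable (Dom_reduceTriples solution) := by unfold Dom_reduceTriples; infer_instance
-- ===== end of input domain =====

-- B replaces A's index scan (step 1 or 3 comparing three consecutive moves) by a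
-- run-length decomposition: each maximal run of L equal moves yields L/3 reverses
-- then L%3 originals.  Objective: alternative (same O(n) cost).

-- ===== PORT A =====
-- A's while loop over index i, transcribed as recursion on the suffix solution[i:];
-- the triple window solution[i], solution[i+1], solution[i+2] (only inspected when
-- i < len-2) is the three-element pattern, the two step widths are the two calls.
def reduceTriplesGoA : List (String × Int) → List (String × Int)
  | a :: b :: c :: rest =>
    if a.1 = b.1 ∧ a.2 = b.2 ∧ b.1 = c.1 ∧ b.2 = c.2 then
      (a.1, -a.2) :: reduceTriplesGoA rest
    else
      a :: reduceTriplesGoA (b :: c :: rest)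
  | x :: rest => x :: reduceTriplesGoA rest
  | [] => []
termination_by l => l.length

def reduceTriples (solution : List (String × Int)) : List (String × Int) :=
  reduceTriplesGoA solution

-- ===== PORT B =====
-- takeRun p l = (length of the leading run of p in l, the remainder) — B's inner while loop.
def takeRun (p : String × Int) : List (String × Int) → Nat × List (String × Int)
  | [] => (0, [])
  | q :: rest =>
    if q = p then ((takeRun p rest).1 + 1, (takeRun p rest).2) else (0, q :: rest)

theorem takeRun_len (p : String × Int) : ∀ l : List (String × Int), (takeRun p l).2.length ≤ l.length := by
  intro l
  induction l with
  | nil => simp [takeRun]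
  | cons q rest ih =>
    simp only [takeRun]
    split
    · exact le_trans ih (Nat.le_succ _)
    · simp

def reduceTriplesGoB : List (String × Int) → List (String × Int)
  | [] => []
  | p :: rest =>
    let t := takeRun p rest
    let L := t.1 + 1
    List.replicate (L / 3) (p.1, -p.2) ++ List.replicate (L % 3) p ++ reduceTriplesGoB t.2
termination_by l => l.length
decreasing_by
  exact Nat.lt_succ_of_le (takeRun_len _ _)

def reduceTriples_alt (solution : List (String × Int)) : List (String × Int) :=
  reduceTriplesGoB solution

-- ===== PRECONDITION & SPEC =====
def Spec_reduceTriples (solution : List (String × Int)) (out : List (String × Int)) : Prop := out = reduceTriples_alt solution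
instance (solution : List (String × Int)) (out : List (String × Int)) : Decidable (Spec_reduceTriples solution out) := by unfold Spec_reduceTriples; infer_instance

-- ===== CLAIM (what is proved, stated in full; the proofs are below) =====
def Claim_equal_reduceTriples : Prop := ∀ (solution : List (String × Int)), Dom_reduceTriples solution → Spec_reduceTriples solution (reduceTriples solution)

-- ===== LEMMAS AND PROOFS =====

-- "ys does not start with p"
def headNe (p : String × Int) (ys : List (String × Int)) : Prop :=
  ∀ q rest, ys = q :: rest → q ≠ p

theorem takeRun_decomp (p : String × Int) :
    ∀ l : List (String × Int),
      l = List.replicate (takeRun p l).1 p ++ (takeRun p l).2 ∧ headNe p (takeRun p l).2 := by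
  intro l
  induction l with
  | nil => exact ⟨rfl, by intro q rest h; simp [takeRun] at h⟩
  | cons q rest ih =>
    by_cases hq : q = p
    · refine ⟨?_, ?_⟩
      · simp only [takeRun, if_pos hq, List.replicate_succ, List.cons_append]
        rw [hq]; exact congrArg _ ih.1
      · simpa [takeRun, if_pos hq] using ih.2
    · refine ⟨by simp [takeRun, if_neg hq], ?_⟩
      intro q' rest' h
      simp only [takeRun, if_neg hq] at h
      cases h
      · exact hq

-- goA applied to p::ys when ys does not start with p just emits p.
theorem goA_cons_ne (p : String × Int) (ys : List (String × Int)) (h : headNe p ys) :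
    reduceTriplesGoA (p :: ys) = p :: reduceTriplesGoA ys := by
  match ys with
  | [] => simp [reduceTriplesGoA]
  | [y] => simp [reduceTriplesGoA]
  | y1 :: y2 :: rest =>
    have hne : y1 ≠ p := h y1 (y2 :: rest) rfl
    rw [reduceTriplesGoA]
    rw [if_neg]
    intro ⟨h1, h2, _⟩
    exact hne (Prod.ext h1.symm h2.symm)

-- The heart: on a maximal run of k copies of p followed by ys, A's greedy scan
-- emits k/3 reverses then k%3 originals, then continues on ys.
theorem goA_run (p : String × Int) :
    ∀ k : Nat, ∀ ys : List (String × Int), headNe p ys →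
      reduceTriplesGoA (List.replicate k p ++ ys)
        = List.replicate (k / 3) (p.1, -p.2) ++ List.replicate (k % 3) p
            ++ reduceTriplesGoA ys := by
  intro k
  induction k using Nat.strong_induction_on with
  | _ k ih =>
    match k with
    | 0 => intro ys _; simp
    | 1 =>
      intro ys h
      simpa using goA_cons_ne p ys h
    | 2 =>
      intro ys h
      match ys with
      | [] => simp [reduceTriplesGoA]
      | y :: rest =>
        have hne : y ≠ p := h y rest rfl
        show reduceTriplesGoA (p :: p :: y :: rest) = _
        rw [reduceTriplesGoA, if_neg]
        · have := goA_cons_ne p (y :: rest) h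
          rw [show (p :: y :: rest : List _) = p :: y :: rest from rfl] at this
          simp [this]
        · intro ⟨_, _, h3, h4⟩
          exact hne (Prod.ext h3.symm h4.symm)
    | (m + 3) =>
      intro ys h
      have hrepl : (List.replicate (m + 3) p ++ ys : List _)
          = p :: p :: p :: (List.replicate m p ++ ys) := by
        simp [List.replicate_succ]
      rw [hrepl, reduceTriplesGoA, if_pos ⟨rfl, rfl, rfl, rfl⟩]
      rw [ih m (by omega) ys h]
      have hd : (m + 3) / 3 = m / 3 + 1 := Nat.add_div_right m (by norm_num)
      have hm : (m + 3) % 3 = m % 3 := Nat.add_mod_right m 3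
      rw [hd, hm, List.replicate_succ]
      simp

theorem goA_eq_goB : ∀ l : List (String × Int), reduceTriplesGoA l = reduceTriplesGoB l := by
  intro l
  induction hn : l.length using Nat.strong_induction_on generalizing l with
  | _ n ih =>
    match l with
    | [] => simp [reduceTriplesGoA, reduceTriplesGoB]
    | p :: rest =>
      obtain ⟨hdec, hhd⟩ := takeRun_decomp p rest
      have hlen : (takeRun p rest).2.length < n := by
        have := takeRun_len p rest
        subst hn
        simp only [List.length_cons]
        omega
      have hA : reduceTriplesGoA (p :: rest)
          = List.replicate (((takeRun p rest).1 + 1) / 3) (p.1, -p.2)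
              ++ List.replicate (((takeRun p rest).1 + 1) % 3) p
              ++ reduceTriplesGoA (takeRun p rest).2 := by
        have : (p :: rest : List _)
            = List.replicate ((takeRun p rest).1 + 1) p ++ (takeRun p rest).2 := by
          rw [List.replicate_succ, List.cons_append]; exact congrArg _ hdec
        rw [this, goA_run p _ _ hhd]
      rw [hA, reduceTriplesGoB]
      rw [ih _ hlen _ rfl]

-- ===== VERDICT (by name: the statement is the Claim_ definition above) =====
theorem reduceTriples_spec : Claim_equal_reduceTriples := by
  intro solution _
  show reduceTriples solution = reduceTriples_alt solution
  exact goA_eq_goB solution
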